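-- pv_equiv track=rewrite | github.com/sohn0356-git/algorithm_study | Kiwan/0609_완전탐색_모의고사.py | solution
-- ===== SOURCE A (Python) =====
-- def compare(p, answers):
--     check = 0
--     len_P = len(p)
--     len_Answers = len(answers)
--     if len_Answers >= len_P:
--         for i in range(len_Answers):
--             if p[i % len_P] == answers[i]:
--                 check += 1
--     else:
--         for i in range(len_Answers):
--             if p[i] == answers[i % len_Answers]:
--                 check += 1
--     return check
--
-- def solution(answers):
--     answer = [0, 0, 0]
--     answerd = []
--     p1 = [1,2,3,4,5]
--     p2 = [2,1,2,3,2,4,2,5]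
--     p3 = [3,3,1,1,2,2,4,4,5,5]
--
--     answer[0] = compare(p1, answers)
--     answer[1] = compare(p2, answers)
--     answer[2] = compare(p3, answers)
--
--     # for i in range(3):
--     #     if answer[i] == 0:
--     #         pass
--     #     else:
--     #         if answerd == []:
--     #             answerd.append(i+1)
--     #         else:
--     #             for j in range(len(answerd)):
--     #                 if answer[i] > answerd[j]:
--     #                     if j == 0:
--     #                         answerd.insert(0, i+1)
--     #                     else:
--     #                         answerd.insert(j-1, i+1)
--     #                 else:
--     #                     answerd.insert(j+1, i+1)
--     for idx,value in enumerate(answer):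
--         if value == max(answer):
--             answerd.append(idx+1)
--
--
--     return answerd
-- ===== SOURCE B (Python) =====
-- def solution(answers):
--     # One pass builds a frequency table keyed by (position mod 40, value); since
--     # 5, 8 and 10 all divide 40, each pattern's score is then a fixed 40-term sum
--     # over the table, with no further scan of answers.
--     freq = {}
--     for i, a in enumerate(answers):
--         key = (i % 40, a)
--         freq[key] = freq.get(key, 0) + 1
--     patterns = [[1, 2, 3, 4, 5],
--                 [2, 1, 2, 3, 2, 4, 2, 5],
--                 [3, 3, 1, 1, 2, 2, 4, 4, 5, 5]]
--     counts = [sum(freq.get((r, p[r % len(p)]), 0) for r in range(40))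
--               for p in patterns]
--     best = max(counts)
--     return [k + 1 for k, c in enumerate(counts) if c == best]
-- ===== Notes on version B (the rewrite author's own statement) =====
-- stated objective: alternative
-- what changed: Replaces the per-pattern scans of answers by a frequency table: one pass builds a dict counting (index mod 40, value) pairs (40 = lcm of the pattern lengths), after which each pattern's score is a fixed 40-term table lookup sum with no further scan of the input.
import Mathlib
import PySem

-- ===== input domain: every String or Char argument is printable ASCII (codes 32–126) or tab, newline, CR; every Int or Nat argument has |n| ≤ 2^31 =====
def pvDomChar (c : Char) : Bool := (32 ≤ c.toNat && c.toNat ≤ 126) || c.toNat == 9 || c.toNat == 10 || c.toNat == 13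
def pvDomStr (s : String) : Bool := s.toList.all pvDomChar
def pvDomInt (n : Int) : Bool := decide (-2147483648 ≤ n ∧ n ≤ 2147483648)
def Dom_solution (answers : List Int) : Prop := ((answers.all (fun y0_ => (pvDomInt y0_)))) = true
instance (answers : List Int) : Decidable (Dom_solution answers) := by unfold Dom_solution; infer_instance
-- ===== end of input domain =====

-- B replaces A's per-pattern scans of answers by a frequency table built in one pass, keyed by
-- (index mod 40, value) with 40 = lcm(5,8,10); each pattern's score is then a 40-term lookup sum
-- (objective: alternative algorithm, same asymptotic cost).

-- ===== PORT A =====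
-- Indexing via pyGetD with default 0: every index compare takes is in range at every call
-- solution makes (patterns are non-empty and the loop index stays below the relevant length).
def compareA (p answers : List Int) : Int :=
  let lenP : Int := p.length
  let lenA : Int := answers.length
  if lenA ≥ lenP then
    (PySem.List.pyRange 0 lenA).foldl
      (fun check i =>
        if PySem.List.pyGetD p (PySem.Int.mod i lenP) 0 == PySem.List.pyGetD answers i 0
        then check + 1 else check) 0
  else
    (PySem.List.pyRange 0 lenA).foldl
      (fun check i =>
        if PySem.List.pyGetD p i 0 == PySem.List.pyGetD answers (PySem.Int.mod i lenA) 0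
        then check + 1 else check) 0

def solution (answers : List Int) : List Int :=
  let p1 : List Int := [1,2,3,4,5]
  let p2 : List Int := [2,1,2,3,2,4,2,5]
  let p3 : List Int := [3,3,1,1,2,2,4,4,5,5]
  let answer : List Int := [compareA p1 answers, compareA p2 answers, compareA p3 answers]
  -- max(answer): answer has three elements, so max? is always some; getD 0 is never taken
  (PySem.List.enumerate answer).foldl
    (fun answerd iv =>
      if iv.2 == (PySem.List.max? answer (fun x => x)).getD 0 then answerd ++ [iv.1 + 1] else answerd) []

-- ===== PORT B =====
def solution_alt (answers : List Int) : List Int :=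
  let freq : PySem.Dict (Int × Int) Int :=
    (PySem.List.enumerate answers).foldl
      (fun d ia =>
        d.insert (PySem.Int.mod ia.1 40, ia.2) (d.getD (PySem.Int.mod ia.1 40, ia.2) 0 + 1))
      PySem.Dict.empty
  let patterns : List (List Int) := [[1,2,3,4,5],[2,1,2,3,2,4,2,5],[3,3,1,1,2,2,4,4,5,5]]
  let counts : List Int :=
    patterns.map (fun p =>
      (PySem.List.pyRange 0 40).foldl
        (fun s r => s + freq.getD (r, PySem.List.pyGetD p (PySem.Int.mod r (p.length : Int)) 0) 0) 0)
  let best : Int := (PySem.List.max? counts (fun x => x)).getD 0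
  ((PySem.List.enumerate counts).filter (fun kc => kc.2 == best)).map (fun kc => kc.1 + 1)

-- ===== PRECONDITION & SPEC =====
def Spec_solution (answers : List Int) (out : List Int) : Prop := out = solution_alt answers
instance (answers : List Int) (out : List Int) : Decidable (Spec_solution answers out) := by unfold Spec_solution; infer_instance

-- ===== CLAIM (what is proved, stated in full; the proofs are below) =====
def Claim_equal_solution : Prop := ∀ (answers : List Int), Dom_solution answers → Spec_solution answers (solution answers)

-- ===== LEMMAS AND PROOFS =====

-- a pattern's hit count in canonical form: fold over enumerate
def cntHits (p answers : List Int) : Int :=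
  (PySem.List.enumerate answers).foldl
    (fun c ia =>
      if PySem.List.pyGetD p (PySem.Int.mod ia.1 p.length) 0 == ia.2 then c + 1 else c) 0

theorem compareA_eq_cntHits (p answers : List Int) (hp : p ≠ []) :
    compareA p answers = cntHits p answers := by
  have hp' : (0:Int) < p.length := by
    exact_mod_cast Nat.pos_of_ne_zero (fun h => hp (List.eq_nil_of_length_eq_zero h))
  unfold compareA cntHits
  rw [PySem.List.enumerate_eq_map_pyRange answers 0, List.foldl_map]
  simp only [PySem.List.len]
  by_cases h : (answers.length : Int) ≥ (p.length : Int)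
  · simp [h]
  · simp only [if_neg h, ge_iff_le, not_le] at *
    apply PySem.List.foldl_congr_mem
    intro acc i hi
    rw [PySem.List.mem_pyRange_one] at hi
    have h1 : PySem.Int.mod i (answers.length : Int) = i := by
      rw [PySem.Int.mod_eq_emod_of_pos (by omega)]; exact Int.emod_eq_of_lt hi.1 hi.2
    have h2 : PySem.Int.mod i (p.length : Int) = i := by
      rw [PySem.Int.mod_eq_emod_of_pos hp']; exact Int.emod_eq_of_lt hi.1 (by omega)
    rw [h1, h2]

-- the key list B's frequency dict counts
def bKeys (answers : List Int) : List (Int × Int) :=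
  (PySem.List.enumerate answers).map (fun ia => (PySem.Int.mod ia.1 40, ia.2))

theorem freq_getD (answers : List Int) (k : Int × Int) :
    ((PySem.List.enumerate answers).foldl
      (fun d ia =>
        d.insert ((PySem.Int.mod ia.1 40, ia.2) : Int × Int) (d.getD (PySem.Int.mod ia.1 40, ia.2) 0 + 1))
      PySem.Dict.empty).getD k 0 = ((bKeys answers).count k : Int) := by
  rw [bKeys,
    ← List.foldl_map (f := fun ia : Int × Int => (PySem.Int.mod ia.1 40, ia.2))
      (g := fun (d : PySem.Dict (Int × Int) Int) x => d.insert x (d.getD x 0 + 1)),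
    PySem.Dict.getD_foldl_insert_add_one, PySem.Dict.getD_empty, zero_add]

theorem sum_indicator (rs : List Int) (hnd : rs.Nodup) (r0 : Int) (h0 : r0 ∈ rs)
    (a : Int) (g : Int → Int) :
    (rs.map (fun r => if ((r0, a) : Int × Int) = (r, g r) then (1:Int) else 0)).sum
      = if a = g r0 then 1 else 0 := by
  induction rs with
  | nil => cases h0
  | cons r t ih =>
    simp only [List.map_cons, List.sum_cons]
    rcases List.mem_cons.mp h0 with h | h
    · subst h
      have hz : (t.map (fun r => if ((r0, a) : Int × Int) = (r, g r) then (1:Int) else 0)).sum = 0 := by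
        apply List.sum_eq_zero
        intro x hx
        rcases List.mem_map.mp hx with ⟨r, hr, hval⟩
        have hne : r0 ≠ r := fun he => (List.nodup_cons.mp hnd).1 (he ▸ hr)
        rw [← hval, if_neg (by simp only [Prod.mk.injEq, not_and]; intro he; exact absurd he hne)]
      rw [hz, add_zero]
      by_cases ha : a = g r0 <;> simp [Prod.ext_iff, ha]
    · have hr0 : r0 ≠ r := fun he => (List.nodup_cons.mp hnd).1 (he ▸ h)
      rw [if_neg (by simp only [Prod.mk.injEq, not_and]; intro he; exact absurd he hr0), zero_add]
      exact ih (List.nodup_cons.mp hnd).2 h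

theorem pyRange40_nodup : (PySem.List.pyRange 0 40).Nodup := by decide

-- each pattern's 40-term table sum equals its hit count (p.length divides 40)
theorem bCountGen (p : List Int) (hp : p ≠ []) (hL : (p.length : Int) ∣ 40) (answers : List Int) :
    (PySem.List.pyRange 0 40).foldl
      (fun s r => s + ((bKeys answers).count
          ((r, PySem.List.pyGetD p (PySem.Int.mod r (p.length : Int)) 0) : Int × Int) : Int)) 0
      = cntHits p answers := by
  have hp' : (0:Int) < p.length := by
    exact_mod_cast Nat.pos_of_ne_zero (fun h => hp (List.eq_nil_of_length_eq_zero h))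
  induction answers using List.reverseRecOn with
  | nil =>
    simp [bKeys, PySem.List.enumerate_nil, cntHits]
  | append_singleton xs a ih =>
    have hn : (0:Int) ≤ (xs.length : Int) := by positivity
    have hkeys : bKeys (xs ++ [a]) = bKeys xs ++ [(PySem.Int.mod (xs.length : Int) 40, a)] := by
      simp [bKeys, PySem.List.enumerate_append, PySem.List.enumerate_cons, PySem.List.enumerate_nil]
    have hmod40 : PySem.Int.mod (xs.length : Int) 40 = (xs.length : Int) % 40 :=
      PySem.Int.mod_eq_emod_of_pos (by norm_num)
    have hcnt : cntHits p (xs ++ [a]) = cntHits p xs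
        + (if PySem.List.pyGetD p (PySem.Int.mod (xs.length : Int) (p.length : Int)) 0 == a
           then (1:Int) else 0) := by
      unfold cntHits
      rw [PySem.List.enumerate_append, List.foldl_append]
      simp [PySem.List.enumerate_cons, PySem.List.enumerate_nil]
      split_ifs <;> simp
    rw [hcnt, ← ih, PySem.List.foldl_add, PySem.List.foldl_add]
    simp only [hkeys, List.count_append, Nat.cast_add, List.sum_map_add]
    have hsingle :
        (PySem.List.pyRange 0 40).map
          (fun r => (([(PySem.Int.mod (xs.length : Int) 40, a)].count
              ((r, PySem.List.pyGetD p (PySem.Int.mod r (p.length : Int)) 0) : Int × Int) : Nat) : Int))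
        = (PySem.List.pyRange 0 40).map
            (fun r => if (((xs.length : Int) % 40, a) : Int × Int)
                = (r, PySem.List.pyGetD p (PySem.Int.mod r (p.length : Int)) 0) then (1:Int) else 0) := by
      apply List.map_congr_left
      intro r _
      rw [hmod40]
      simp only [List.count_cons, List.count_nil, beq_iff_eq]
      by_cases hc : (((xs.length : Int) % 40, a) : Int × Int)
          = (r, PySem.List.pyGetD p (PySem.Int.mod r (p.length : Int)) 0)
      · simp [hc]
      · simp [hc]
    rw [hsingle, sum_indicator _ pyRange40_nodup ((xs.length : Int) % 40)
        (by rw [PySem.List.mem_pyRange_one]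
            constructor
            · exact Int.emod_nonneg _ (by norm_num)
            · exact Int.emod_lt_of_pos _ (by norm_num))]
    have hidx : PySem.Int.mod ((xs.length : Int) % 40) (p.length : Int)
        = PySem.Int.mod (xs.length : Int) (p.length : Int) := by
      rw [PySem.Int.mod_eq_emod_of_pos hp', PySem.Int.mod_eq_emod_of_pos hp',
        Int.emod_emod_of_dvd _ hL]
    rw [hidx]
    have hflip : ∀ x : Int, (if a = x then (1:Int) else 0) = (if x == a then (1:Int) else 0) := by
      intro x
      by_cases h : a = x
      · simp [h]
      · have h2 : (x == a) = false := by
          simp only [beq_eq_false_iff_ne, ne_eq]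
          exact fun he => h he.symm
        simp [h, h2]
    rw [hflip]
    ring

-- ===== VERDICT (by name: the statement is the Claim_ definition above) =====
theorem solution_spec : Claim_equal_solution := by
  intro answers _
  unfold Spec_solution solution solution_alt
  simp only [freq_getD, List.map_cons, List.map_nil]
  rw [bCountGen [1,2,3,4,5] (by simp) (by decide) answers,
    bCountGen [2,1,2,3,2,4,2,5] (by simp) (by decide) answers,
    bCountGen [3,3,1,1,2,2,4,4,5,5] (by simp) (by decide) answers,
    ← compareA_eq_cntHits [1,2,3,4,5] answers (by simp),
    ← compareA_eq_cntHits [2,1,2,3,2,4,2,5] answers (by simp),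
    ← compareA_eq_cntHits [3,3,1,1,2,2,4,4,5,5] answers (by simp)]
  set a1 := compareA [1,2,3,4,5] answers
  set a2 := compareA [2,1,2,3,2,4,2,5] answers
  set a3 := compareA [3,3,1,1,2,2,4,4,5,5] answers
  clear_value a1 a2 a3
  rw [PySem.List.max?_id_cons]
  simp only [Option.getD_some, List.foldl_cons, List.foldl_nil,
    List.nil_append, max_assoc, PySem.List.enumerate_cons, PySem.List.enumerate_nil]
  norm_num [List.filter_cons, List.filter_nil]
  split_ifs <;> simp
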